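-- pv_equiv track=rewrite | github.com/koba925/alds | atcoder/ABC136/D.py | solve_runlength
-- ===== SOURCE A (Python) =====
-- def run_length(seq):
--     length = len(seq)
--     i, ret = 0, []
--     while i < length:
--         elem, count = seq[i], 0
--         while i + count < length and seq[i + count] == elem:
--             count += 1
--         ret.append((elem, count))
--         i += count
--     return ret
--
-- def solve_runlength(s):
--     ans = [0] * len(s)
--     rl = run_length(s)
--     pos = 0
--     for i in range(0, len(rl), 2):
--         r, l = rl[i][1], rl[i + 1][1]
--         pos += r
--         ans[pos - 1] = ans[pos] = (r + l) // 2
--         if (r + l) % 2 == 1: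
--             ans[pos - l % 2] += 1
--         pos += l
--     return ans
-- ===== SOURCE B (Python) =====
-- def solve_runlength(s):
--     # Single pass with no intermediate run-length list: read two maximal
--     # runs at a time and emit the block for that pair directly.
--     res = []
--     i, n = 0, len(s)
--     while i < n:
--         j = i
--         while j < n and s[j] == s[i]:
--             j += 1
--         r = j - i
--         c = s[j]  # IndexError when the number of runs is odd, like A's rl[i+1]
--         k = j
--         while k < n and s[k] == c:
--             k += 1
--         l = k - j
--         h = (r + l) // 2
--         odd = (r + l) % 2
--         lo = l % 2
--         res += [0] * (r - 1) + [h + odd * lo, h + odd * (1 - lo)] + [0] * (l - 1)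
--         i = k
--     return res
-- ===== Notes on version B (the rewrite author's own statement) =====
-- stated objective: alternative
-- what changed: B drops the run_length helper and the preallocated zero array entirely: one pass reads two maximal runs at a time and emits each pair's output block by list concatenation instead of mutating indices in a zero-filled array.
import Mathlib
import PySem

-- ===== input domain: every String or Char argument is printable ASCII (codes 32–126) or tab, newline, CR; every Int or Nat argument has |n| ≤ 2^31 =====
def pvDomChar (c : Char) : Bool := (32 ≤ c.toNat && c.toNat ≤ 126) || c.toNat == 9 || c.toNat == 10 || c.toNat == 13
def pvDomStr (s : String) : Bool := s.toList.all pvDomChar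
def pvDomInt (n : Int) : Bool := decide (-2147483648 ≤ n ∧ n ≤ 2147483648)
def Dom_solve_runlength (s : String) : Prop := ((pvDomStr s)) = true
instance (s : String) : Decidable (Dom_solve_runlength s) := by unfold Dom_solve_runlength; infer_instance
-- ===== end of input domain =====

-- B builds the answer by concatenating one block per pair of runs (no run_length list, no
-- preallocated mutated array); equivalence proved on inputs with an even number of runs.

-- termination helper cited by both ports' decreasing_by (kept tiny on purpose)
lemma drop_len_le (n : Nat) (l : List Char) : (l.drop n).length ≤ l.length :=
  (Nat.le_of_eq List.length_drop).trans (Nat.sub_le _ _)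

-- ===== PORT A =====
-- inner while of run_length: length of the maximal prefix of the remaining list equal to elem
def rlCountA (elem : Char) : List Char → Nat
  | [] => 0
  | x :: xs => if x = elem then rlCountA elem xs + 1 else 0

def runLengthA : List Char → List (Char × Nat)
  | [] => []
  | c :: rest =>
      (c, rlCountA c rest + 1) :: runLengthA (rest.drop (rlCountA c rest + 1 - 1))
termination_by l => l.length
decreasing_by
  exact Nat.lt_succ_of_le (drop_len_le _ _)

-- ans[i] += 1
def incrAt (ans : List Int) (i : Nat) : List Int := ans.set i (ans.getD i 0 + 1)

-- the for-loop over range(0, len(rl), 2); the one-element case is Python's IndexError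
-- (excluded by Pre_solve_runlength)
def fillA : List (Char × Nat) → Nat → List Int → List Int
  | [], _, ans => ans
  | [_], _, ans => ans
  | (_, r) :: (_, l) :: rl, pos, ans =>
      fillA rl (pos + r + l)
        (if (r + l) % 2 = 1 then
          incrAt (((ans.set (pos + r - 1) ((r + l) / 2 : Nat)).set (pos + r) ((r + l) / 2 : Nat)))
            (pos + r - l % 2)
         else ((ans.set (pos + r - 1) ((r + l) / 2 : Nat)).set (pos + r) ((r + l) / 2 : Nat)))

def solve_runlength (s : String) : List Int :=
  fillA (runLengthA s.toList) 0 (List.replicate s.toList.length 0)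

-- ===== PORT B =====
-- B's inner while: length of the maximal prefix equal to the run's character
def bRun (c : Char) : List Char → Nat
  | [] => 0
  | x :: xs => if x = c then bRun c xs + 1 else 0

-- B's single while loop: read two maximal runs (r = j - i, l = k - j), emit the pair's
-- block by concatenation, continue after the pair.  The empty-match branch is B's
-- IndexError at s[j] (excluded by Pre_solve_runlength).
def bGo : List Char → List Int
  | [] => []
  | c :: rest =>
      match hm : rest.drop (bRun c rest + 1 - 1) with
      | [] => []
      | d :: rest2 =>
          List.replicate (bRun c rest + 1 - 1) 0
            ++ [(((bRun c rest + 1) + (bRun d rest2 + 1)) / 2 : Nat)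
                  + ((((bRun c rest + 1) + (bRun d rest2 + 1)) % 2 : Nat) : Int)
                    * (((bRun d rest2 + 1) % 2 : Nat) : Int),
                (((bRun c rest + 1) + (bRun d rest2 + 1)) / 2 : Nat)
                  + ((((bRun c rest + 1) + (bRun d rest2 + 1)) % 2 : Nat) : Int)
                    * (1 - (((bRun d rest2 + 1) % 2 : Nat) : Int))]
            ++ List.replicate (bRun d rest2 + 1 - 1) 0
            ++ bGo (rest2.drop (bRun d rest2 + 1 - 1))
termination_by l => l.length
decreasing_by
  have h2 : rest2.length + 1 ≤ rest.length := by
    rw [← List.length_cons (a := d) (as := rest2), ← hm]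
    exact drop_len_le _ _
  exact Nat.lt_succ_of_le ((drop_len_le _ _).trans (Nat.le_of_succ_le h2))

def solve_runlength_alt (s : String) : List Int := bGo s.toList

-- ===== PRECONDITION & SPEC =====
-- number of maximal runs of equal characters (1 + number of adjacent unequal pairs)
def countRuns : List Char → Nat
  | [] => 0
  | [_] => 1
  | a :: b :: t => (if a = b then 0 else 1) + countRuns (b :: t)

-- Pre_ excludes strings with an odd number of maximal runs, on which A raises
-- IndexError at rl[i + 1] (B raises IndexError there too).
def Pre_solve_runlength (s : String) : Prop := countRuns s.toList % 2 = 0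
instance (s : String) : Decidable (Pre_solve_runlength s) := by unfold Pre_solve_runlength; infer_instance

def pvWitness_solve_runlength : String := "RRL"

def Spec_solve_runlength (s : String) (out : List Int) : Prop := out = solve_runlength_alt s
instance (s : String) (out : List Int) : Decidable (Spec_solve_runlength s out) := by unfold Spec_solve_runlength; infer_instance

-- ===== CLAIM (what is proved, stated in full; the proofs are below) =====
def Claim_equal_solve_runlength : Prop := ∀ (s : String), Dom_solve_runlength s → Pre_solve_runlength s → Spec_solve_runlength s (solve_runlength s)

-- ===== LEMMAS AND PROOFS =====

lemma rlCountA_le (c : Char) (t : List Char) : rlCountA c t ≤ t.length := by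
  induction t with
  | nil => simp [rlCountA]
  | cons x xs ih => simp only [rlCountA, List.length_cons]; split <;> omega

lemma bRun_eq (c : Char) (t : List Char) : bRun c t = rlCountA c t := by
  induction t with
  | nil => rfl
  | cons x xs ih => simp only [bRun, rlCountA, ih]

lemma countRuns_cons (c : Char) (t : List Char) :
    countRuns (c :: t) = 1 + countRuns (t.drop (rlCountA c t)) := by
  induction t generalizing c with
  | nil => rfl
  | cons x xs ih =>
    by_cases h : x = c
    · subst h
      simp only [countRuns, rlCountA]
      simpa using ih x
    · simp [countRuns, rlCountA, h, Ne.symm h]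

lemma repl_split (a b m : Nat) :
    List.replicate (a + 1 + (b + 1) + m) (0 : Int)
      = List.replicate a 0 ++ 0 :: 0 :: (List.replicate b 0 ++ List.replicate m 0) := by
  rw [← List.replicate_add b m, ← List.replicate_succ, ← List.replicate_succ, ← List.replicate_add]
  congr 1
  omega

lemma write_at (pre rep : List Int) (u v : Int) (rest : List Int) (x : Int) :
    (pre ++ rep ++ u :: v :: rest).set (pre.length + rep.length) x
      = pre ++ rep ++ x :: v :: rest := by
  rw [List.append_assoc, List.set_append_right _ _ (by omega), Nat.add_sub_cancel_left,
    List.set_append_right _ _ (by omega), Nat.sub_self, List.set_cons_zero, List.append_assoc]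

lemma write_at1 (pre rep : List Int) (u v : Int) (rest : List Int) (x : Int) :
    (pre ++ rep ++ u :: v :: rest).set (pre.length + rep.length + 1) x
      = pre ++ rep ++ u :: x :: rest := by
  rw [List.append_assoc, List.set_append_right _ _ (by omega)]
  have e : pre.length + rep.length + 1 - pre.length = rep.length + 1 := by omega
  rw [e, List.set_append_right _ _ (by omega)]
  have e2 : rep.length + 1 - rep.length = 1 := by omega
  rw [e2, List.set_cons_succ, List.set_cons_zero, List.append_assoc]

lemma getD_at (pre rep : List Int) (u v : Int) (rest : List Int) :
    (pre ++ rep ++ u :: v :: rest).getD (pre.length + rep.length) 0 = u := by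
  rw [List.append_assoc, List.getD_append_right _ _ _ _ (by omega), Nat.add_sub_cancel_left,
    List.getD_append_right _ _ _ _ (by omega), Nat.sub_self]
  rfl

lemma getD_at1 (pre rep : List Int) (u v : Int) (rest : List Int) :
    (pre ++ rep ++ u :: v :: rest).getD (pre.length + rep.length + 1) 0 = v := by
  rw [List.append_assoc, List.getD_append_right _ _ _ _ (by omega)]
  have e : pre.length + rep.length + 1 - pre.length = rep.length + 1 := by omega
  rw [e, List.getD_append_right _ _ _ _ (by omega)]
  have e2 : rep.length + 1 - rep.length = 1 := by omega
  rw [e2]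
  rfl

lemma writes_pair (pre : List Int) (k : Nat) (rest : List Int) (x y : Int) :
    (((pre ++ List.replicate k 0 ++ (0 : Int) :: 0 :: rest).set (pre.length + (k + 1) - 1) x).set
        (pre.length + (k + 1)) y)
      = pre ++ List.replicate k 0 ++ x :: y :: rest := by
  have e1 : pre.length + (k + 1) - 1 = pre.length + (List.replicate k (0 : Int)).length := by
    simp only [List.length_replicate]; omega
  have e2 : pre.length + (k + 1) = pre.length + (List.replicate k (0 : Int)).length + 1 := by
    simp only [List.length_replicate]; omega
  rw [e1, write_at, e2, write_at1]

lemma incr_fst (pre : List Int) (k : Nat) (u v : Int) (rest : List Int) :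
    incrAt (pre ++ List.replicate k 0 ++ u :: v :: rest) (pre.length + (k + 1) - 1)
      = pre ++ List.replicate k 0 ++ (u + 1) :: v :: rest := by
  have e1 : pre.length + (k + 1) - 1 = pre.length + (List.replicate k (0 : Int)).length := by
    simp only [List.length_replicate]; omega
  unfold incrAt
  rw [e1, getD_at, write_at]

lemma incr_snd (pre : List Int) (k : Nat) (u v : Int) (rest : List Int) :
    incrAt (pre ++ List.replicate k 0 ++ u :: v :: rest) (pre.length + (k + 1) - 0)
      = pre ++ List.replicate k 0 ++ u :: (v + 1) :: rest := by
  have e2 : pre.length + (k + 1) - 0 = pre.length + (List.replicate k (0 : Int)).length + 1 := by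
    simp only [List.length_replicate]; omega
  unfold incrAt
  rw [e2, getD_at1, write_at1]

lemma main_lemma (n : Nat) : ∀ cs : List Char, cs.length ≤ n → countRuns cs % 2 = 0 →
    ∀ pre : List Int,
      fillA (runLengthA cs) pre.length (pre ++ List.replicate cs.length (0 : Int))
        = pre ++ bGo cs := by
  induction n with
  | zero =>
    intro cs hlen _ pre
    have : cs = [] := List.length_eq_zero_iff.mp (by omega)
    subst this
    simp [runLengthA, fillA, bGo]
  | succ n ih =>
    intro cs hlen hpar pre
    match cs with
    | [] => simp [runLengthA, fillA, bGo]
    | c :: rest =>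
      have hlen' : rest.length ≤ n := by simpa using hlen
      have hk := rlCountA_le c rest
      rcases hdrop : rest.drop (rlCountA c rest) with _ | ⟨d, rest2⟩
      · exfalso
        rw [countRuns_cons, hdrop] at hpar
        simp [countRuns] at hpar
      · have hk2 := rlCountA_le d rest2
        have hlr : rest.length = rlCountA c rest + 1 + rest2.length := by
          have := congrArg List.length hdrop
          simp only [List.length_drop, List.length_cons] at this
          omega
        have hB : bGo (c :: rest)
            = List.replicate (rlCountA c rest) 0
              ++ [((((rlCountA c rest + 1) + (rlCountA d rest2 + 1)) / 2 : Nat) : Int)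
                    + ((((rlCountA c rest + 1) + (rlCountA d rest2 + 1)) % 2 : Nat) : Int)
                      * (((rlCountA d rest2 + 1) % 2 : Nat) : Int),
                  ((((rlCountA c rest + 1) + (rlCountA d rest2 + 1)) / 2 : Nat) : Int)
                    + ((((rlCountA c rest + 1) + (rlCountA d rest2 + 1)) % 2 : Nat) : Int)
                      * (1 - (((rlCountA d rest2 + 1) % 2 : Nat) : Int))]
              ++ List.replicate (rlCountA d rest2) 0
              ++ bGo (rest2.drop (rlCountA d rest2)) := by
          rw [bGo]
          simp only [bRun_eq, Nat.add_sub_cancel]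
          split
          · rename_i heq
            simp only [bRun_eq, Nat.add_sub_cancel] at heq
            rw [hdrop] at heq
            exact absurd heq (by simp)
          · rename_i d' rest2' heq
            simp only [bRun_eq, Nat.add_sub_cancel] at heq
            rw [hdrop] at heq
            obtain ⟨rfl, rfl⟩ := by simpa using heq.symm
            rfl
        have hpar2 : countRuns (rest2.drop (rlCountA d rest2)) % 2 = 0 := by
          have h1 : countRuns (c :: rest) = 1 + countRuns (d :: rest2) := by
            rw [countRuns_cons, hdrop]
          have h2 := countRuns_cons d rest2
          omega
        have key : ∀ u v : Int,
            fillA (runLengthA (rest2.drop (rlCountA d rest2)))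
                (pre.length + (rlCountA c rest + 1) + (rlCountA d rest2 + 1))
                (pre ++ List.replicate (rlCountA c rest) 0
                  ++ u :: v :: (List.replicate (rlCountA d rest2) 0
                      ++ List.replicate (rest2.length - rlCountA d rest2) 0))
              = pre ++ (List.replicate (rlCountA c rest) 0 ++ [u, v]
                  ++ List.replicate (rlCountA d rest2) 0
                  ++ bGo (rest2.drop (rlCountA d rest2))) := by
          intro u v
          have hIH := ih (rest2.drop (rlCountA d rest2))
            (by simp only [List.length_drop]; omega) hpar2
            (pre ++ List.replicate (rlCountA c rest) 0 ++ [u, v]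
              ++ List.replicate (rlCountA d rest2) 0)
          rw [List.length_drop] at hIH
          have e : pre.length + (rlCountA c rest + 1) + (rlCountA d rest2 + 1)
              = (pre ++ List.replicate (rlCountA c rest) 0 ++ [u, v]
                  ++ List.replicate (rlCountA d rest2) 0).length := by
            simp only [List.length_append, List.length_replicate, List.length_cons,
              List.length_nil]
            omega
          rw [e]
          have e2 : pre ++ List.replicate (rlCountA c rest) 0 ++ [u, v]
                ++ List.replicate (rlCountA d rest2) 0
                ++ List.replicate (rest2.length - rlCountA d rest2) (0 : Int)
              = pre ++ List.replicate (rlCountA c rest) 0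
                ++ u :: v :: (List.replicate (rlCountA d rest2) 0
                    ++ List.replicate (rest2.length - rlCountA d rest2) 0) := by
            simp [List.append_assoc]
          rw [e2] at hIH
          rw [hIH]
          simp [List.append_assoc]
        rw [hB, runLengthA]
        simp only [Nat.add_sub_cancel]
        rw [hdrop, runLengthA]
        simp only [Nat.add_sub_cancel]
        rw [fillA]
        simp only [List.length_cons]
        have hm2 : rest.length + 1 = rlCountA c rest + 1 + (rlCountA d rest2 + 1)
            + (rest2.length - rlCountA d rest2) := by omega
        rw [hm2, repl_split, ← List.append_assoc]
        split_ifs with hodd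
        · rcases Nat.mod_two_eq_zero_or_one (rlCountA d rest2 + 1) with hl | hl
          · rw [writes_pair, hl, incr_snd, key, hodd]
            norm_num
          · rw [writes_pair, hl, incr_fst, key, hodd]
            norm_num
        · have hev : (rlCountA c rest + 1 + (rlCountA d rest2 + 1)) % 2 = 0 := by omega
          rw [writes_pair, key, hev]
          norm_num

-- ===== VERDICT (by name: the statement is the Claim_ definition above) =====
theorem solve_runlength_spec : Claim_equal_solve_runlength := by
  intro s _ hpre
  unfold Spec_solve_runlength solve_runlength solve_runlength_alt
  have := main_lemma s.toList.length s.toList le_rfl hpre []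
  simpa using this
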